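-- pv_equiv track=rewrite | github.com/BichengWang/py-notebook | src/leetcode/interview_collections.py | helper
-- ===== SOURCE A (Python) =====
-- def helper(house):
--     h_dict = {}
--     for h in house:
--         h_l = h.split(',')
--         h_k = ",".join(h_l[:3])
--         id = h_l[3]
--         if h_k not in h_dict:
--             h_dict[h_k] = {}
--         h_dict[h_k][id] = h_dict[h_k].get(id, 0) + 1
--     return h_dict
-- ===== SOURCE B (Python) =====
-- # B: two passes -- first partition ids into lists per key, then count each list.
-- def _count(ids):
--     c = {}
--     for i in ids:
--         c[i] = c.get(i, 0) + 1
--     return c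
--
-- def helper(house):
--     groups = {}
--     for h in house:
--         fields = h.split(',')
--         key = ",".join(fields[:3])
--         groups.setdefault(key, []).append(fields[3])
--     return {key: _count(ids) for key, ids in groups.items()}
-- ===== Notes on version B (the rewrite author's own statement) =====
-- stated objective: alternative
-- what changed: Replaces A's single interleaved pass (which maintains the nested count dict with a guarded inner update per record) by two differently-shaped passes: first partition the ids into per-key lists via setdefault/append, then convert each list into a count dict in a second pass.
import Mathlib
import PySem

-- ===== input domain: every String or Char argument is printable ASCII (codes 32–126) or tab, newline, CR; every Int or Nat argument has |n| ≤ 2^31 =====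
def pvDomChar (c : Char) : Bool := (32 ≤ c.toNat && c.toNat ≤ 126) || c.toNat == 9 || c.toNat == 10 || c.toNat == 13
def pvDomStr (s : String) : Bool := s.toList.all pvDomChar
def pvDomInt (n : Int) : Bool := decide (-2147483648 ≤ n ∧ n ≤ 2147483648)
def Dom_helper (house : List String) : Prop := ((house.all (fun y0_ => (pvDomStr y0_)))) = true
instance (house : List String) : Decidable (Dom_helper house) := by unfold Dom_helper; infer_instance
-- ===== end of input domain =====

-- B replaces A's single interleaved pass (guarded nested-dict update per record) by two
-- differently-shaped passes: partition the ids into per-key lists, then count each list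
-- (objective: alternative decomposition, same cost).

-- ===== PORT A =====
-- one interleaved pass maintaining the nested count dict directly
def helper (house : List String) : List (String × List (String × Int)) :=
  (house.foldl (fun h_dict h =>
    let h_l := (PySem.Str.split? h ",").getD []          -- h.split(','), sep literal "," ≠ "" so never none
    let h_k := PySem.Str.join "," (PySem.List.slice h_l none (some 3))
    let i := PySem.List.pyGetD h_l 3 ""                  -- h_l[3]; in range under Pre_helper, else Python raises
    let h_dict := if h_dict.contains h_k then h_dict else h_dict.insert h_k PySem.Dict.empty
    let inner := h_dict.getD h_k PySem.Dict.empty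
    h_dict.insert h_k (inner.insert i (inner.getD i 0 + 1))
  ) (PySem.Dict.empty : PySem.Dict String (PySem.Dict String Int))).items.map
    (fun p => (p.1, p.2.items))

-- ===== PORT B =====
-- pass 2 helper: dict counting a list of ids
def pvCount (ids : List String) : PySem.Dict String Int :=
  ids.foldl (fun c i => c.insert i (c.getD i 0 + 1)) PySem.Dict.empty

def helper_alt (house : List String) : List (String × List (String × Int)) :=
  let groups : PySem.Dict String (List String) := house.foldl (fun g h =>
    let fields := (PySem.Str.split? h ",").getD []
    let key := PySem.Str.join "," (PySem.List.slice fields none (some 3))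
    g.modify key [] (fun l => l ++ [PySem.List.pyGetD fields 3 ""])) PySem.Dict.empty
  groups.items.map (fun p => (p.1, (pvCount p.2).items))

-- ===== PRECONDITION & SPEC =====
-- Pre_ excludes exactly the inputs where a record has fewer than 4 comma-separated fields:
-- there A (and B alike) raises IndexError on h_l[3].
def Pre_helper (house : List String) : Prop :=
  ∀ h ∈ house, 4 ≤ ((PySem.Str.split? h ",").getD []).length
instance (house : List String) : Decidable (Pre_helper house) := by unfold Pre_helper; infer_instance
def pvWitness_helper : List String := ["a,b,c,7", "a,b,c,7", "a,b,d,8"]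

def Spec_helper (house : List String) (out : List (String × List (String × Int))) : Prop := out = helper_alt house
instance (house : List String) (out : List (String × List (String × Int))) : Decidable (Spec_helper house out) := by unfold Spec_helper; infer_instance

-- ===== CLAIM (what is proved, stated in full; the proofs are below) =====
def Claim_equal_helper : Prop := ∀ (house : List String), Dom_helper house → Pre_helper house → Spec_helper house (helper house)

-- ===== LEMMAS AND PROOFS =====

-- A's per-record step and B's per-record step, as named functions (the ports' lambdas, by rfl)
def pvStepA (h_dict : PySem.Dict String (PySem.Dict String Int)) (h : String) :
    PySem.Dict String (PySem.Dict String Int) :=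
  let h_l := (PySem.Str.split? h ",").getD []
  let h_k := PySem.Str.join "," (PySem.List.slice h_l none (some 3))
  let i := PySem.List.pyGetD h_l 3 ""
  let h_dict := if h_dict.contains h_k then h_dict else h_dict.insert h_k PySem.Dict.empty
  let inner := h_dict.getD h_k PySem.Dict.empty
  h_dict.insert h_k (inner.insert i (inner.getD i 0 + 1))

def pvStepB (g : PySem.Dict String (List String)) (h : String) : PySem.Dict String (List String) :=
  let fields := (PySem.Str.split? h ",").getD []
  let key := PySem.Str.join "," (PySem.List.slice fields none (some 3))
  g.modify key [] (fun l => l ++ [PySem.List.pyGetD fields 3 ""])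

-- the simulation map: count every group list
def pvMapc (g : PySem.Dict String (List String)) : PySem.Dict String (PySem.Dict String Int) :=
  ⟨g.items.map (fun p => (p.1, pvCount p.2))⟩

theorem pvMapc_contains (g : PySem.Dict String (List String)) (k : String) :
    (pvMapc g).contains k = g.contains k := by
  simp [pvMapc, PySem.Dict.contains, List.any_map, Function.comp_def]

theorem pvMapc_get? (g : PySem.Dict String (List String)) (k : String) :
    (pvMapc g).get? k = (g.get? k).map pvCount := by
  simp only [pvMapc, PySem.Dict.get?, List.find?_map]
  rcases hf : g.items.find? (fun p => p.1 == k) with _ | p <;>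
    simp_all [Function.comp_def]

theorem pvMapc_insert (g : PySem.Dict String (List String)) (k : String) (v : List String) :
    pvMapc (g.insert k v) = (pvMapc g).insert k (pvCount v) := by
  by_cases hc : g.contains k = true
  · have hc' : (pvMapc g).contains k = true := by rw [pvMapc_contains]; exact hc
    have e1 : g.insert k v = ⟨g.items.map (fun p => if (p.1 == k) = true then (k, v) else p)⟩ := by
      simp only [PySem.Dict.insert, hc, if_pos]
    have e2 : (pvMapc g).insert k (pvCount v)
        = ⟨(pvMapc g).items.map (fun p => if (p.1 == k) = true then (k, pvCount v) else p)⟩ := by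
      simp only [PySem.Dict.insert, hc', if_pos]
    rw [e1, e2]
    simp only [pvMapc]
    congr 1
    rw [List.map_map, List.map_map]
    apply List.map_congr_left
    intro p _
    by_cases hp : p.1 = k <;> simp [hp]
  · have hc' : ¬ (pvMapc g).contains k = true := by rw [pvMapc_contains]; exact hc
    have e1 : g.insert k v = ⟨g.items ++ [(k, v)]⟩ := by
      simp only [PySem.Dict.insert, hc, if_neg, Bool.not_eq_true]
    have e2 : (pvMapc g).insert k (pvCount v) = ⟨(pvMapc g).items ++ [(k, pvCount v)]⟩ := by
      simp only [PySem.Dict.insert, hc', if_neg, Bool.not_eq_true]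
    rw [e1, e2]
    simp [pvMapc]

theorem pvMapc_getD (g : PySem.Dict String (List String)) (k : String) :
    (pvMapc g).getD k PySem.Dict.empty = pvCount (g.getD k []) := by
  simp only [PySem.Dict.getD, pvMapc_get?]
  cases hg : g.get? k <;> simp [pvCount]

theorem pvInsert_pos {K V : Type} [BEq K] (d : PySem.Dict K V) (k : K) (w : V)
    (hc : d.contains k = true) :
    d.insert k w = ⟨d.items.map (fun p => if (p.1 == k) = true then (k, w) else p)⟩ := by
  simp only [PySem.Dict.insert, hc, if_pos]

theorem pvCount_append_singleton (l : List String) (i : String) :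
    pvCount (l ++ [i]) = (pvCount l).insert i ((pvCount l).getD i 0 + 1) := by
  simp [pvCount, List.foldl_append]

theorem pvInsert_insert_self {K V : Type} [BEq K] [LawfulBEq K]
    (d : PySem.Dict K V) (k : K) (v w : V) :
    (d.insert k v).insert k w = d.insert k w := by
  by_cases hc : d.contains k = true
  · rcases List.any_eq_true.mp hc with ⟨p, hp, hpk⟩
    have e1 : d.insert k v = ⟨d.items.map (fun p => if (p.1 == k) = true then (k, v) else p)⟩ := by
      simp only [PySem.Dict.insert, hc, if_pos]
    have hc2 : (d.insert k v).contains k = true := by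
      rw [e1]
      exact List.any_eq_true.mpr ⟨_, List.mem_map_of_mem hp, by simp [hpk]⟩
    have e2 : (d.insert k v).insert k w
        = ⟨(d.insert k v).items.map (fun p => if (p.1 == k) = true then (k, w) else p)⟩ :=
      pvInsert_pos _ k w hc2
    have e3 : d.insert k w = ⟨d.items.map (fun p => if (p.1 == k) = true then (k, w) else p)⟩ := by
      simp only [PySem.Dict.insert, hc, if_pos]
    rw [e2, e3, e1]
    congr 1
    rw [List.map_map]
    apply List.map_congr_left
    intro q _
    by_cases hq : q.1 = k <;> simp [hq]
  · have hall : ∀ p ∈ d.items, ¬ (p.1 == k) = true := by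
      intro p hp hpk
      exact hc (List.any_eq_true.mpr ⟨p, hp, hpk⟩)
    have e1 : d.insert k v = ⟨d.items ++ [(k, v)]⟩ := by
      simp only [PySem.Dict.insert, hc, if_neg, Bool.not_eq_true]
    have hc2 : (d.insert k v).contains k = true := by
      rw [e1]; simp [PySem.Dict.contains]
    have e2 : (d.insert k v).insert k w
        = ⟨(d.insert k v).items.map (fun p => if (p.1 == k) = true then (k, w) else p)⟩ :=
      pvInsert_pos _ k w hc2
    have e3 : d.insert k w = ⟨d.items ++ [(k, w)]⟩ := by
      simp only [PySem.Dict.insert, hc, if_neg, Bool.not_eq_true]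
    rw [e2, e3, e1]
    congr 1
    rw [List.map_append]
    have hid : d.items.map (fun p => if (p.1 == k) = true then (k, w) else p) = d.items := by
      conv_rhs => rw [← List.map_id d.items]
      apply List.map_congr_left
      intro q hq
      simp [hall q hq]
    simp [hid]

theorem pvStep_comm (g : PySem.Dict String (List String)) (h : String) :
    pvStepA (pvMapc g) h = pvMapc (pvStepB g h) := by
  simp only [pvStepA, pvStepB, PySem.Dict.modify, pvMapc_insert, pvCount_append_singleton,
    pvMapc_contains]
  by_cases hc : g.contains (PySem.Str.join "," (PySem.List.slice ((PySem.Str.split? h ",").getD []) none (some 3))) = true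
  · simp [hc, pvMapc_getD]
  · have hall : ∀ p ∈ g.items, ¬ (p.1 == (PySem.Str.join "," (PySem.List.slice ((PySem.Str.split? h ",").getD []) none (some 3)))) = true := by
      intro p hp hpk
      exact hc (List.any_eq_true.mpr ⟨p, hp, hpk⟩)
    have hg0 : g.getD (PySem.Str.join "," (PySem.List.slice ((PySem.Str.split? h ",").getD []) none (some 3))) [] = [] := by
      simp [PySem.Dict.getD, PySem.Dict.get?, List.find?_eq_none.mpr hall]
    simp only [hc, if_neg, Bool.not_eq_true, hg0]
    rw [PySem.Dict.getD_insert_self, pvInsert_insert_self]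
    rfl

theorem pvFold_inv (house : List String) (g : PySem.Dict String (List String)) :
    house.foldl pvStepA (pvMapc g) = pvMapc (house.foldl pvStepB g) := by
  induction house generalizing g with
  | nil => rfl
  | cons h t ih => simpa [List.foldl_cons, pvStep_comm] using ih (pvStepB g h)

-- ===== VERDICT (by name: the statement is the Claim_ definition above) =====
theorem helper_spec : Claim_equal_helper := by
  intro house _ _
  unfold Spec_helper helper helper_alt
  have hinv := pvFold_inv house PySem.Dict.empty
  have h0 : pvMapc PySem.Dict.empty = (PySem.Dict.empty : PySem.Dict String (PySem.Dict String Int)) := rfl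
  rw [h0] at hinv
  show (house.foldl pvStepA PySem.Dict.empty).items.map (fun p => (p.1, p.2.items)) = _
  rw [hinv]
  simp only [pvMapc, List.map_map, Function.comp_def]
  rfl
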